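-- pv_equiv track=rewrite | github.com/lucaskorol21/GO-RXR | UTILS/data_structure.py | find_each_bound
-- ===== SOURCE A (Python) =====
-- def find_closing_bracket(string, open_index):
--     stack = []  # Use a stack to keep track of nested brackets
--     for i in range(open_index, len(string)):
--         if string[i] == '[':
--             stack.append('[')
--         elif string[i] == ']':
--             if not stack:
--                 return -1  # No matching opening bracket found
--             stack.pop()
--             if not stack:
--                 return i  # Found the matching closing bracket
--
--     return -1  # No matching closing bracket found
--
-- def find_each_bound(string):
--     #string = string[1:-1]
--     my_bounds = []
--
--     while string != '':
--         if string[0] == ',' or string[0] == ' ':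
--             string = string[1:]
--         else:
--             idx = find_closing_bracket(string,0)
--             my_bounds.append(string[0:idx+1])
--             string = string[idx+2:]
--
--     return my_bounds
-- ===== SOURCE B (Python) =====
-- def find_each_bound(string):
--     # Single left-to-right pass with an index pointer and an integer depth
--     # counter; no slicing of the remaining string.
--     bounds = []
--     n = len(string)
--     i = 0
--     while i < n:
--         c = string[i]
--         if c == ',' or c == ' ':
--             i += 1
--             continue
--         depth = 0
--         j = i
--         end = -1
--         while j < n:
--             ch = string[j]
--             if ch == '[':
--                 depth += 1
--             elif ch == ']':
--                 if depth == 0: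
--                     break
--                 depth -= 1
--                 if depth == 0:
--                     end = j
--                     break
--             j += 1
--         if end == -1:
--             bounds.append('')
--             i += 1
--         else:
--             bounds.append(string[i:end + 1])
--             i = end + 2
--     return bounds
-- ===== Notes on version B (the rewrite author's own statement) =====
-- stated objective: alternative
-- what changed: Replaces the repeated slice-and-restart loop (each iteration copies the remaining string and rescans it from index 0, with a list used as a bracket stack) by a single left-to-right pass over the original string with an index pointer and an integer depth counter, making no substring copies except the returned groups.
import Mathlib
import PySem

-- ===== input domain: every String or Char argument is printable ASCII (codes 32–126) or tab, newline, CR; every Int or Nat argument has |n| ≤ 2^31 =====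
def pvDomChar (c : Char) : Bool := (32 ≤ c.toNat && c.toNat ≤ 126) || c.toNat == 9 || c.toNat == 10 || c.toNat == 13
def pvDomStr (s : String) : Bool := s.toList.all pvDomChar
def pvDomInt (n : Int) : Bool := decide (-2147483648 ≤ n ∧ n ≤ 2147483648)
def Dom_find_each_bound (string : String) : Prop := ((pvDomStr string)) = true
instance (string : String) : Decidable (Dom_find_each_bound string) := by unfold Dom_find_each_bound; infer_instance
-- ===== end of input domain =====

-- B replaces A's slice-and-restart loop by one left-to-right index-pointer pass with a depth counter (no substring copies; same worst-case cost).
-- Both loops are ported with an explicit fuel argument that merely bounds the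
-- iteration count (each iteration consumes at least one character / advances the
-- index, so the initial fuel is never exhausted before the Python loop exits).

-- ===== PORT A =====
-- find_closing_bracket's for-loop over range(open_index, len(string)): index i, stack of '['
def fcbLoop : Nat → List Char → Nat → List Char → Int
  | 0, _, _, _ => -1
  | fuel + 1, s, i, stack =>
    if h : i < s.length then
      if s[i] = '[' then fcbLoop fuel s (i + 1) ('[' :: stack)
      else if s[i] = ']' then
        if stack = [] then -1
        else if stack.tail = [] then (i : Int)
        else fcbLoop fuel s (i + 1) stack.tail
      else fcbLoop fuel s (i + 1) stack
    else -1

def find_closing_bracket (s : List Char) (open_index : Nat) : Int :=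
  fcbLoop (s.length - open_index) s open_index []

-- the while-loop of find_each_bound, on the remaining string
def febLoop : Nat → List Char → List (List Char)
  | 0, _ => []
  | fuel + 1, s =>
    if hs : s = [] then []
    else if s.head hs = ',' ∨ s.head hs = ' ' then febLoop fuel s.tail
    else
      PySem.List.slice s (some 0) (some (find_closing_bracket s 0 + 1)) ::
        febLoop fuel (PySem.List.slice s (some (find_closing_bracket s 0 + 2)) none)

def find_each_bound (string : String) : List String :=
  (febLoop string.toList.length string.toList).map String.ofList

-- ===== PORT B =====
-- inner while-loop of Source B: scan from j with a depth counter; the closing index, or -1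
def bScan : Nat → List Char → Nat → Int → Int
  | 0, _, _, _ => -1
  | fuel + 1, s, j, depth =>
    if h : j < s.length then
      if s[j] = '[' then bScan fuel s (j + 1) (depth + 1)
      else if s[j] = ']' then
        if depth = 0 then -1
        else if depth - 1 = 0 then (j : Int)
        else bScan fuel s (j + 1) (depth - 1)
      else bScan fuel s (j + 1) depth
    else -1

-- outer while-loop of Source B: index pointer i over the original string
def bLoop : Nat → List Char → Nat → List (List Char)
  | 0, _, _ => []
  | fuel + 1, s, i =>
    if h : i < s.length then
      if s[i] = ',' ∨ s[i] = ' ' then bLoop fuel s (i + 1)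
      else -- `end` in Source B; the scan result is used in both branches
        if bScan (s.length - i) s i 0 = -1 then [] :: bLoop fuel s (i + 1)
        else ((s.drop i).take ((bScan (s.length - i) s i 0).toNat + 1 - i))
              :: bLoop fuel s ((bScan (s.length - i) s i 0).toNat + 2)
    else []

def find_each_bound_alt (string : String) : List String :=
  (bLoop string.toList.length string.toList 0).map String.ofList

-- ===== PRECONDITION & SPEC =====
def Spec_find_each_bound (string : String) (out : List String) : Prop := out = find_each_bound_alt string
instance (string : String) (out : List String) : Decidable (Spec_find_each_bound string out) := by unfold Spec_find_each_bound; infer_instance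

-- ===== CLAIM =====
def Claim_equal_find_each_bound : Prop := ∀ (string : String), Dom_find_each_bound string → Spec_find_each_bound string (find_each_bound string)

-- ===== LEMMAS AND PROOFS =====

-- find_closing_bracket returns -1 or a valid (hence nonnegative) index
theorem fcbLoop_ge (f : Nat) : ∀ (s : List Char) (i : Nat) (stack : List Char),
    -1 ≤ fcbLoop f s i stack := by
  induction f with
  | zero => intro s i stack; simp [fcbLoop]
  | succ f ih =>
    intro s i stack
    rw [fcbLoop]
    split_ifs <;> first | omega | exact ih ..

-- A's stack of '[' characters corresponds to B's depth counter; A's index k in the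
-- dropped string corresponds to B's absolute index i + k.
theorem scan_agree (f : Nat) : ∀ (s : List Char) (i k : Nat) (stack : List Char),
    (∀ c ∈ stack, c = '[') →
    bScan f s (i + k) (stack.length : Int) =
      (if fcbLoop f (s.drop i) k stack = -1 then -1
       else (i : Int) + fcbLoop f (s.drop i) k stack) := by
  induction f with
  | zero => intro s i k stack _; simp [bScan, fcbLoop]
  | succ f ih =>
    intro s i k stack hst
    by_cases hlt : i + k < s.length
    · have hlt' : k < (s.drop i).length := by simp [List.length_drop]; omega
      rw [bScan, fcbLoop, dif_pos hlt, dif_pos hlt']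
      have hget : (s.drop i)[k] = s[i + k] := List.getElem_drop
      rw [hget]
      by_cases hb : s[i + k] = '['
      · rw [if_pos hb, if_pos hb]
        have h1 := ih s i (k + 1) ('[' :: stack)
          (by intro c hc; rcases List.mem_cons.mp hc with h | h; exacts [h, hst c h])
        have e1 : i + (k + 1) = i + k + 1 := by omega
        have e2 : (((('[' :: stack).length : Nat)) : Int) = (stack.length : Int) + 1 := by
          simp
        rw [e1, e2] at h1
        exact h1
      · rw [if_neg hb, if_neg hb]
        by_cases hc : s[i + k] = ']'
        · rw [if_pos hc, if_pos hc]
          by_cases hemp : stack = []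
          · subst hemp
            simp
          · have hlen : stack.length ≠ 0 := by simpa [List.length_eq_zero_iff] using hemp
            rw [if_neg hemp, if_neg (show (stack.length : Int) ≠ 0 by exact_mod_cast hlen)]
            by_cases htl : stack.tail = []
            · have htl' : (stack.length : Int) - 1 = 0 := by
                have h0 : stack.tail.length = 0 := by simp [htl]
                rw [List.length_tail] at h0
                omega
              rw [if_pos htl, if_pos htl']
              rw [if_neg (show ¬ ((k : Nat) : Int) = -1 by omega)]
              push_cast
              ring
            · have htl' : ¬ (stack.length : Int) - 1 = 0 := by
                have h0 : stack.tail.length ≠ 0 := fun h => htl (List.length_eq_zero_iff.mp h)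
                rw [List.length_tail] at h0
                omega
              rw [if_neg htl, if_neg htl']
              have h1 := ih s i (k + 1) stack.tail
                (by intro c hc; exact hst c (List.mem_of_mem_tail hc))
              have e1 : i + (k + 1) = i + k + 1 := by omega
              have e2 : ((stack.tail.length : Nat) : Int) = (stack.length : Int) - 1 := by
                have : stack.tail.length = stack.length - 1 := by simp [List.length_tail]
                omega
              rw [e1, e2] at h1
              exact h1
        · rw [if_neg hc, if_neg hc]
          have h1 := ih s i (k + 1) stack hst
          have e1 : i + (k + 1) = i + k + 1 := by omega
          rw [e1] at h1
          exact h1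
    · have hge' : ¬ k < (s.drop i).length := by simp [List.length_drop]; omega
      rw [bScan, fcbLoop, dif_neg hlt, dif_neg hge']
      simp

-- main correspondence: A's loop on the dropped string equals B's loop at index i,
-- for any common fuel
theorem loop_agree (f : Nat) : ∀ (s : List Char) (i : Nat),
    febLoop f (s.drop i) = bLoop f s i := by
  induction f with
  | zero => intro s i; rfl
  | succ f ih =>
    intro s i
    by_cases hlt : i < s.length
    · have hne : s.drop i ≠ [] := by
        simp [List.drop_eq_nil_iff]; omega
      have hhead : (s.drop i).head hne = s[i] := by
        rw [List.head_eq_getElem]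
        simp
      rw [febLoop, bLoop, dif_neg hne, dif_pos hlt, hhead]
      have hfuel : (s.drop i).length = s.length - i := by simp [List.length_drop]
      by_cases hcs : s[i] = ',' ∨ s[i] = ' '
      · rw [if_pos hcs, if_pos hcs, List.tail_drop]
        exact ih s (i + 1)
      · rw [if_neg hcs, if_neg hcs]
        have hscan := scan_agree (s.length - i) s i 0 [] (by intro c hc; cases hc)
        simp only [Nat.add_zero, List.length_nil, Nat.cast_zero] at hscan
        have hidx_ge : -1 ≤ fcbLoop (s.length - i) (s.drop i) 0 [] := fcbLoop_ge ..
        show PySem.List.slice (s.drop i) (some 0) (some (find_closing_bracket (s.drop i) 0 + 1))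
              :: febLoop f (PySem.List.slice (s.drop i) (some (find_closing_bracket (s.drop i) 0 + 2)) none)
            = _
        unfold find_closing_bracket
        rw [show (s.drop i).length - 0 = s.length - i by simp [List.length_drop]]
        by_cases hm1 : fcbLoop (s.length - i) (s.drop i) 0 [] = -1
        · rw [if_pos hm1] at hscan
          rw [hm1, if_pos hscan, show ((-1 : Int) + 2) = ((1 : Nat) : Int) by decide,
            PySem.List.slice_from_natCast, List.drop_drop,
            ih s (i + 1)]
          simp [PySem.List.slice]
        · rw [if_neg hm1] at hscan
          have hge0 : 0 ≤ fcbLoop (s.length - i) (s.drop i) 0 [] := by omega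
          rw [hscan, if_neg (show ¬ ((i : Int) + fcbLoop (s.length - i) (s.drop i) 0 [] = -1) by omega)]
          congr 1
          · rw [show (fcbLoop (s.length - i) (s.drop i) 0 [] + 1)
                  = (((fcbLoop (s.length - i) (s.drop i) 0 []).toNat + 1 : Nat) : Int) by omega]
            rw [PySem.List.slice_zero_start, PySem.List.slice_to_natCast,
              show ((i : Int) + fcbLoop (s.length - i) (s.drop i) 0 []).toNat + 1 - i
                  = (fcbLoop (s.length - i) (s.drop i) 0 []).toNat + 1 by omega]
          · have htn : ((i : Int) + fcbLoop (s.length - i) (s.drop i) 0 []).toNat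
                = i + (fcbLoop (s.length - i) (s.drop i) 0 []).toNat := by omega
            rw [show (fcbLoop (s.length - i) (s.drop i) 0 [] + 2)
                  = (((fcbLoop (s.length - i) (s.drop i) 0 []).toNat + 2 : Nat) : Int) by omega,
              PySem.List.slice_from_natCast, List.drop_drop, htn,
              show i + ((fcbLoop (s.length - i) (s.drop i) 0 []).toNat + 2)
                  = i + (fcbLoop (s.length - i) (s.drop i) 0 []).toNat + 2 from (Nat.add_assoc ..).symm]
            exact ih s (i + (fcbLoop (s.length - i) (s.drop i) 0 []).toNat + 2)
    · have hnil : s.drop i = [] := List.drop_eq_nil_of_le (by omega)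
      rw [febLoop, bLoop, hnil, dif_neg hlt]
      simp

-- ===== VERDICT =====
theorem find_each_bound_spec : Claim_equal_find_each_bound := by
  intro string _
  unfold Spec_find_each_bound find_each_bound find_each_bound_alt
  have h := loop_agree string.toList.length string.toList 0
  simp only [List.drop_zero] at h
  rw [h]
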